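-- pv_equiv track=rewrite | github.com/arturoornelasb/tibia-bonelord-469-cipher | archive/scripts/analysis/session18_deep_analysis.py | dp_coverage
-- ===== SOURCE A (Python) =====
-- KNOWN = set([
--     'AB', 'AM', 'AN', 'ALS', 'AUF', 'AUS', 'BEI', 'DA', 'DAS', 'DEM',
--     'DEN', 'DER', 'DES', 'DIE', 'DU', 'ER', 'ES', 'IM', 'IN', 'IST',
--     'JA', 'MAN', 'OB', 'SO', 'UM', 'UND', 'VON', 'VOR', 'WO', 'ZU',
--     'EIN', 'ICH', 'SIE', 'WER', 'WIE', 'WAS', 'WIR',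
--     'GEH', 'GIB', 'HAT', 'HIN', 'HER', 'NUN', 'NUR', 'SEI', 'TUN',
--     'SAG', 'WAR', 'ODE', 'SER', 'GEN', 'INS', 'MIN', 'OEL', 'SCE',
--     'ABER', 'ALLE', 'ALLES', 'ALTE', 'ALTEN', 'ALTER', 'AUCH', 'BAND',
--     'BERG', 'BURG', 'DENN', 'DIES', 'DOCH', 'DORT', 'DREI', 'DURCH',
--     'EINE', 'EINEM', 'EINEN', 'EINER', 'EINES', 'ENDE', 'ERDE', 'ERST',
--     'ERSTE', 'FACH', 'FAND', 'FERN', 'FEST', 'FORT', 'GAR', 'GANZ',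
--     'GEGEN', 'GEIST', 'GOTT', 'GOLD', 'GRAB', 'GROSS', 'GRUFT', 'GUT',
--     'HAND', 'HEIM', 'HELD', 'HERR', 'HIER', 'HOCH', 'IMMER',
--     'KANN', 'KLAR', 'KRAFT', 'LAND', 'LANG', 'LICHT', 'MACHT',
--     'MEHR', 'MUSS', 'NACH', 'NACHT', 'NAHM', 'NAME', 'NEU', 'NEUE',
--     'NEUEN', 'NICHT', 'NIE', 'NOCH', 'ODER', 'ORT', 'ORTEN',
--     'REDE', 'REDEN', 'REICH', 'RIEF', 'RUIN', 'RUNE', 'RUNEN',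
--     'SAND', 'SAGT', 'SCHAUN', 'SCHON', 'SEHR', 'SEID', 'SEIN',
--     'SEINE', 'SEINEN', 'SEINER', 'SEINEM', 'SEINES',
--     'SICH', 'SIND', 'SOHN', 'SOLL', 'STEH', 'STEIN', 'STEINE',
--     'STEINEN', 'STERN', 'TAG', 'TAGE', 'TAGEN', 'TAT', 'TEIL',
--     'TIEF', 'TOD', 'TURM', 'UNTER', 'URALTE', 'VIEL', 'VIER',
--     'WAHR', 'WALD', 'WAND', 'WARD', 'WEIL', 'WELT', 'WENN', 'WERT',
--     'WESEN', 'WILL', 'WIND', 'WIRD', 'WORT', 'WORTE', 'ZEIT',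
--     'ZEHN', 'ZORN', 'FINDEN', 'GEBEN', 'GEHEN', 'HABEN', 'KOMMEN',
--     'LEBEN', 'LESEN', 'NEHMEN', 'SAGEN', 'SEHEN', 'STEHEN', 'SUCHEN',
--     'WISSEN', 'WISSET', 'RUFEN', 'WIEDER', 'GEIGET', 'BERUCHTIG',
--     'BERUCHTIGER', 'MEERE', 'NEIGT', 'WISTEN', 'MANIER', 'HUND',
--     'GODE', 'GODES', 'EIGENTUM', 'REDER', 'THENAEUT', 'LABT', 'MORT',
--     'DIGE', 'WEGE', 'KOENIGS', 'NAHE', 'NOT', 'NOTH', 'ZUR', 'OWI',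
--     'ENGE', 'SEIDEN', 'ALTES', 'BIS', 'NUT', 'NUTZ', 'HEIL', 'NEID',
--     'TREU', 'TREUE', 'SUN', 'DIENST', 'SANG', 'DINC', 'HULDE',
--     'LANT', 'HERRE', 'DIENEST', 'GEBOT', 'SCHWUR', 'ORDEN',
--     'RICHTER', 'DUNKEL', 'EHRE', 'EDELE', 'SCHULD', 'SEGEN',
--     'FLUCH', 'RACHE', 'KOENIG', 'DASS', 'EDEL', 'ADEL',
--     'SALZBERG', 'WEICHSTEIN', 'ORANGENSTRASSE',
--     'GOTTDIENER', 'GOTTDIENERS', 'TRAUT', 'LEICH', 'HEIME', 'SCHARDT',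
-- ])
--
-- def dp_coverage(text, known=KNOWN):
--     n = len(text)
--     dp = [0] * (n + 1)
--     for i in range(1, n + 1):
--         dp[i] = dp[i-1]
--         for wlen in range(2, min(i, 20) + 1):
--             start = i - wlen
--             if text[start:i] in known:
--                 score = dp[start] + wlen
--                 if score > dp[i]:
--                     dp[i] = score
--     return dp[n]
-- ===== SOURCE B (Python) =====
-- KNOWN = set([
--     'AB', 'AM', 'AN', 'ALS', 'AUF', 'AUS', 'BEI', 'DA', 'DAS', 'DEM',
--     'DEN', 'DER', 'DES', 'DIE', 'DU', 'ER', 'ES', 'IM', 'IN', 'IST',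
--     'JA', 'MAN', 'OB', 'SO', 'UM', 'UND', 'VON', 'VOR', 'WO', 'ZU',
--     'EIN', 'ICH', 'SIE', 'WER', 'WIE', 'WAS', 'WIR',
--     'GEH', 'GIB', 'HAT', 'HIN', 'HER', 'NUN', 'NUR', 'SEI', 'TUN',
--     'SAG', 'WAR', 'ODE', 'SER', 'GEN', 'INS', 'MIN', 'OEL', 'SCE',
--     'ABER', 'ALLE', 'ALLES', 'ALTE', 'ALTEN', 'ALTER', 'AUCH', 'BAND',
--     'BERG', 'BURG', 'DENN', 'DIES', 'DOCH', 'DORT', 'DREI', 'DURCH',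
--     'EINE', 'EINEM', 'EINEN', 'EINER', 'EINES', 'ENDE', 'ERDE', 'ERST',
--     'ERSTE', 'FACH', 'FAND', 'FERN', 'FEST', 'FORT', 'GAR', 'GANZ',
--     'GEGEN', 'GEIST', 'GOTT', 'GOLD', 'GRAB', 'GROSS', 'GRUFT', 'GUT',
--     'HAND', 'HEIM', 'HELD', 'HERR', 'HIER', 'HOCH', 'IMMER',
--     'KANN', 'KLAR', 'KRAFT', 'LAND', 'LANG', 'LICHT', 'MACHT',
--     'MEHR', 'MUSS', 'NACH', 'NACHT', 'NAHM', 'NAME', 'NEU', 'NEUE',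
--     'NEUEN', 'NICHT', 'NIE', 'NOCH', 'ODER', 'ORT', 'ORTEN',
--     'REDE', 'REDEN', 'REICH', 'RIEF', 'RUIN', 'RUNE', 'RUNEN',
--     'SAND', 'SAGT', 'SCHAUN', 'SCHON', 'SEHR', 'SEID', 'SEIN',
--     'SEINE', 'SEINEN', 'SEINER', 'SEINEM', 'SEINES',
--     'SICH', 'SIND', 'SOHN', 'SOLL', 'STEH', 'STEIN', 'STEINE',
--     'STEINEN', 'STERN', 'TAG', 'TAGE', 'TAGEN', 'TAT', 'TEIL',
--     'TIEF', 'TOD', 'TURM', 'UNTER', 'URALTE', 'VIEL', 'VIER',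
--     'WAHR', 'WALD', 'WAND', 'WARD', 'WEIL', 'WELT', 'WENN', 'WERT',
--     'WESEN', 'WILL', 'WIND', 'WIRD', 'WORT', 'WORTE', 'ZEIT',
--     'ZEHN', 'ZORN', 'FINDEN', 'GEBEN', 'GEHEN', 'HABEN', 'KOMMEN',
--     'LEBEN', 'LESEN', 'NEHMEN', 'SAGEN', 'SEHEN', 'STEHEN', 'SUCHEN',
--     'WISSEN', 'WISSET', 'RUFEN', 'WIEDER', 'GEIGET', 'BERUCHTIG',
--     'BERUCHTIGER', 'MEERE', 'NEIGT', 'WISTEN', 'MANIER', 'HUND',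
--     'GODE', 'GODES', 'EIGENTUM', 'REDER', 'THENAEUT', 'LABT', 'MORT',
--     'DIGE', 'WEGE', 'KOENIGS', 'NAHE', 'NOT', 'NOTH', 'ZUR', 'OWI',
--     'ENGE', 'SEIDEN', 'ALTES', 'BIS', 'NUT', 'NUTZ', 'HEIL', 'NEID',
--     'TREU', 'TREUE', 'SUN', 'DIENST', 'SANG', 'DINC', 'HULDE',
--     'LANT', 'HERRE', 'DIENEST', 'GEBOT', 'SCHWUR', 'ORDEN',
--     'RICHTER', 'DUNKEL', 'EHRE', 'EDELE', 'SCHULD', 'SEGEN',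
--     'FLUCH', 'RACHE', 'KOENIG', 'DASS', 'EDEL', 'ADEL',
--     'SALZBERG', 'WEICHSTEIN', 'ORANGENSTRASSE',
--     'GOTTDIENER', 'GOTTDIENERS', 'TRAUT', 'LEICH', 'HEIME', 'SCHARDT',
-- ])
--
-- def dp_coverage(text, known=KNOWN):
--     # Stage 1: word-centric match finding — scan the text once per dictionary
--     # word and index every occurrence by its END position.
--     n = len(text)
--     ends = {}
--     for w in known:
--         wl = len(w)
--         if wl < 2 or wl > 20:
--             continue
--         for s in range(n - wl + 1):
--             if text[s:s + wl] == w: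
--                 ends.setdefault(s + wl, []).append(s)
--     # Stage 2: weighted-interval-scheduling DP over positions; the candidates
--     # at position i come from the end-index, no substring scan remains here.
--     dp = [0] * (n + 1)
--     for i in range(1, n + 1):
--         best = dp[i - 1]
--         for s in ends.get(i, []):
--             if dp[s] + (i - s) > best:
--                 best = dp[s] + (i - s)
--         dp[i] = best
--     return dp[n]
-- ===== Notes on version B (the rewrite author's own statement) =====
-- stated objective: alternative
-- what changed: A's single per-position DP with an inner scan over substring lengths 2..20 and set-membership tests is replaced by two staged passes: a word-centric pass that slides each dictionary word over the text and indexes every occurrence by its end position in a dict, then a weighted-interval-scheduling DP whose candidates are read off that end-index, so no substring scan remains in the DP; it trades the fixed 20-length inner scan for one sweep per dictionary word.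
import Mathlib
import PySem

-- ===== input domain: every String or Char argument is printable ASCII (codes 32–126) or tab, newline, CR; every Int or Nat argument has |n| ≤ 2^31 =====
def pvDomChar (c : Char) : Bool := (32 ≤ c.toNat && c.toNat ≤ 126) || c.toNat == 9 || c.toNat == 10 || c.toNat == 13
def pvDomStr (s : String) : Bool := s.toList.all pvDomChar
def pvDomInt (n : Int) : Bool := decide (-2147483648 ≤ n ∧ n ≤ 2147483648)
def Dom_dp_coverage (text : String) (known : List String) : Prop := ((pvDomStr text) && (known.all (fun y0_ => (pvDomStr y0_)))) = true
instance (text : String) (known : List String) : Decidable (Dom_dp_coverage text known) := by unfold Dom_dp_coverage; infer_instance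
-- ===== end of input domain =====

-- B replaces A's per-position DP with an inner substring-length scan by two staged passes:
-- a word-centric pass sliding each dictionary word over the text, indexing every occurrence
-- by its end position in a dict, then a weighted-interval-scheduling DP whose candidates come
-- from that end-index (objective: alternative; trades the inner length scan for one sweep per word).

-- ===== PORT A =====
-- dp reads/writes use List.getD/List.set: every index is provably in range (0 ≤ idx ≤ n,
-- list length n+1), so they are exact for Python's dp[idx] / dp[idx] = v.
def dp_coverage (text : String) (known : List String) : Int :=
  let n : Nat := (PySem.Str.len text).toNat          -- n = len(text) (≥ 0, so toNat is exact)
  let dp0 : List Int := List.replicate (n + 1) 0     -- dp = [0] * (n + 1)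
  let dp := (PySem.List.pyRange 1 ((n : Int) + 1)).foldl (fun dp iI =>
    let i : Nat := iI.toNat                          -- 1 ≤ i ≤ n, so toNat is exact
    let dp := dp.set i (dp.getD (i - 1) 0)           -- dp[i] = dp[i-1]
    (PySem.List.pyRange 2 (((min i 20 : Nat) : Int) + 1)).foldl (fun dp wI =>
      let wlen : Nat := wI.toNat                     -- 2 ≤ wlen, so toNat is exact
      let start : Nat := i - wlen                    -- wlen ≤ i, so Nat sub is exact
      if known.contains (PySem.Str.slice text (some (start : Int)) (some (i : Int))) then
        let score : Int := dp.getD start 0 + (wlen : Int)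
        if score > dp.getD i 0 then dp.set i score else dp
      else dp) dp) dp0
  dp.getD n 0

-- ===== PORT B =====
-- Stage 1 of Source B: for each word w (length 2..20), slide it over the text and record every
-- occurrence under its end position (ends.setdefault(s + wl, []).append(s)).
def pvWordStep (text : String) (n : Nat) (d : PySem.Dict Int (List Int)) (w : String) : PySem.Dict Int (List Int) :=
  if PySem.Str.len w < 2 ∨ PySem.Str.len w > 20 then d
  else (PySem.List.pyRange 0 ((n : Int) - PySem.Str.len w + 1)).foldl (fun d s =>
    if PySem.Str.slice text (some s) (some (s + PySem.Str.len w)) == w then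
      PySem.Dict.insert d (s + PySem.Str.len w) (PySem.Dict.getD d (s + PySem.Str.len w) [] ++ [s])
    else d) d

def pvEnds (text : String) (known : List String) (n : Nat) : PySem.Dict Int (List Int) :=
  known.foldl (pvWordStep text n) PySem.Dict.empty

-- Stage 2 of Source B: dp over positions, candidates read off the end-index (dp[s] with s ≥ 0
-- from the index: List.getD is exact there).
def dp_coverage_alt (text : String) (known : List String) : Int :=
  let n : Nat := (PySem.Str.len text).toNat
  let ends := pvEnds text known n
  let dp := (PySem.List.pyRange 1 ((n : Int) + 1)).foldl (fun dp iI =>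
    let best := (PySem.Dict.getD ends iI []).foldl (fun best s =>
      if dp.getD s.toNat 0 + (iI - s) > best then dp.getD s.toNat 0 + (iI - s) else best)
      (dp.getD (iI.toNat - 1) 0)
    dp.set iI.toNat best) (List.replicate (n + 1) 0)
  dp.getD n 0

-- ===== PRECONDITION & SPEC =====
def Spec_dp_coverage (text : String) (known : List String) (out : Int) : Prop := out = dp_coverage_alt text known
instance (text : String) (known : List String) (out : Int) : Decidable (Spec_dp_coverage text known out) := by unfold Spec_dp_coverage; infer_instance

-- ===== CLAIM (what is proved, stated in full; the proofs are below) =====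
def Claim_equal_dp_coverage : Prop := ∀ (text : String) (known : List String), Dom_dp_coverage text known → Spec_dp_coverage text known (dp_coverage text known)

-- ===== LEMMAS AND PROOFS =====

-- `text[s : s+l] in known`, the membership test A performs (s = i - wlen, l = wlen).
def pvWrd (text : String) (known : List String) (s l : Nat) : Bool :=
  known.contains (PySem.Str.slice text (some (s : Int)) (some ((s + l : Nat) : Int)))

-- Nat-index reformulation of A's inner loop (wlen = k + 2 for k < m).
def pvInnerA (text : String) (known : List String) (i : Nat) (dp : List Int) (m : Nat) : List Int :=
  (List.range m).foldl (fun dp k =>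
    if pvWrd text known (i - (k + 2)) (k + 2) then
      if dp.getD (i - (k + 2)) 0 + ((k + 2 : Nat) : Int) > dp.getD i 0 then
        dp.set i (dp.getD (i - (k + 2)) 0 + ((k + 2 : Nat) : Int))
      else dp
    else dp) dp

def pvStepA (text : String) (known : List String) (dp : List Int) (i : Nat) : List Int :=
  pvInnerA text known i (dp.set i (dp.getD (i - 1) 0)) (min i 20 - 1)

def pvAf (text : String) (known : List String) (n t : Nat) : List Int :=
  (List.range t).foldl (fun dp k => pvStepA text known dp (k + 1)) (List.replicate (n + 1) 0)

-- final value of dp cell j in A's run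
def pvG (text : String) (known : List String) (n j : Nat) : Int :=
  (pvAf text known n j).getD j 0

theorem pvRange1 (n : Nat) : PySem.List.pyRange 1 ((n:Int)+1) = (List.range n).map (fun k => ((k:Nat):Int)+1) := by
  rw [PySem.List.pyRange_of_pos _ _ (by norm_num)]
  rcases Nat.eq_zero_or_pos n with h | h
  · subst h; norm_num
  · rw [if_pos (by omega)]
    have : ((((n:Int)+1) - 1 + 1 - 1) / 1).toNat = n := by omega
    rw [this]
    exact List.map_congr_left (fun k _ => by ring)

theorem pvRange2 (m : Nat) : PySem.List.pyRange 2 ((m:Int)+1) = (List.range (m-1)).map (fun k => ((k:Nat):Int)+2) := by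
  rw [PySem.List.pyRange_of_pos _ _ (by norm_num)]
  rcases Nat.lt_or_ge m 2 with h | h
  · interval_cases m <;> norm_num
  · rw [if_pos (by omega)]
    have : ((((m:Int)+1) - 2 + 1 - 1) / 1).toNat = m - 1 := by omega
    rw [this]
    exact List.map_congr_left (fun k _ => by ring)

theorem dpA_eq (text : String) (known : List String) :
    dp_coverage text known =
      (pvAf text known text.toList.length text.toList.length).getD text.toList.length 0 := by
  unfold dp_coverage pvAf
  simp only [PySem.Str.len_eq, Int.toNat_natCast]
  congr 1
  rw [pvRange1, List.foldl_map]
  apply PySem.List.foldl_congr_mem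
  intro dp k hk
  simp only [List.mem_range] at hk
  have hi : (((k:Nat):Int)+1).toNat = k + 1 := by omega
  simp only [hi]
  unfold pvStepA pvInnerA
  rw [pvRange2, List.foldl_map]
  apply PySem.List.foldl_congr_mem
  intro dp' k' hk'
  simp only [List.mem_range] at hk'
  have hw : (((k':Nat):Int)+2).toNat = k' + 2 := by omega
  simp only [hw]
  unfold pvWrd
  have : (k + 1 - (k' + 2) + (k' + 2) : Nat) = k + 1 := by omega
  rw [this]

theorem pv_getD_set_self (l : List Int) (i : Nat) (v : Int) (h : i < l.length) :
    (l.set i v).getD i 0 = v := by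
  simp [List.getD_eq_getElem?_getD, h]

theorem pv_getD_set_ne (l : List Int) (i j : Nat) (v : Int) (h : i ≠ j) :
    (l.set i v).getD j 0 = l.getD j 0 := by
  simp [List.getD_eq_getElem?_getD, h]

theorem innerA_succ (text : String) (known : List String) (i : Nat) (dp : List Int) (m : Nat) :
    pvInnerA text known i dp (m+1) =
      (fun dp (k : Nat) =>
        if pvWrd text known (i - (k + 2)) (k + 2) then
          if dp.getD (i - (k + 2)) 0 + ((k + 2 : Nat) : Int) > dp.getD i 0 then
            dp.set i (dp.getD (i - (k + 2)) 0 + ((k + 2 : Nat) : Int))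
          else dp
        else dp) (pvInnerA text known i dp m) m := by
  simp [pvInnerA, List.range_succ]

theorem innerA_length (text : String) (known : List String) (i : Nat) (dp : List Int) (m : Nat) :
    (pvInnerA text known i dp m).length = dp.length := by
  induction m with
  | zero => simp [pvInnerA]
  | succ m ih => rw [innerA_succ]; dsimp only; split_ifs <;> simp [ih]

theorem innerA_getD_ne (text : String) (known : List String) (i : Nat) (dp : List Int) (m : Nat)
    (j : Nat) (h : j ≠ i) : (pvInnerA text known i dp m).getD j 0 = dp.getD j 0 := by
  induction m with
  | zero => simp [pvInnerA]
  | succ m ih =>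
    rw [innerA_succ]; dsimp only; split_ifs
    · rw [pv_getD_set_ne _ _ _ _ (Ne.symm h), ih]
    · exact ih
    · exact ih

theorem innerA_getD_self (text : String) (known : List String) (i : Nat) (dp : List Int) (m : Nat)
    (hlen : i < dp.length) (h : ∀ k < m, k + 2 ≤ i) :
    (pvInnerA text known i dp m).getD i 0 =
      (List.range m).foldl (fun acc k =>
        if pvWrd text known (i - (k + 2)) (k + 2) then
          max acc (dp.getD (i - (k + 2)) 0 + ((k + 2 : Nat) : Int))
        else acc) (dp.getD i 0) := by
  induction m with
  | zero => simp [pvInnerA]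
  | succ m ih =>
    have h' : ∀ k < m, k + 2 ≤ i := fun k hk => h k (by omega)
    have hne : i - (m + 2) ≠ i := by have := h m (by omega); omega
    rw [innerA_succ, List.range_succ, List.foldl_append]
    dsimp only [List.foldl_cons, List.foldl_nil]
    rw [← ih h']
    rw [innerA_getD_ne _ _ _ _ _ _ hne]
    split_ifs with hw hgt
    · rw [pv_getD_set_self _ _ _ (by rw [innerA_length]; exact hlen)]
      omega
    · omega
    · rfl

theorem Af_succ (text : String) (known : List String) (n t : Nat) :
    pvAf text known n (t+1) = pvStepA text known (pvAf text known n t) (t+1) := by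
  simp [pvAf, List.range_succ]

theorem Af_length (text : String) (known : List String) (n t : Nat) :
    (pvAf text known n t).length = n + 1 := by
  induction t with
  | zero => simp [pvAf]
  | succ t ih => rw [Af_succ]; unfold pvStepA; rw [innerA_length]; simp [ih]

theorem stepA_getD_ne (text : String) (known : List String) (dp : List Int) (i j : Nat)
    (h : j ≠ i) : (pvStepA text known dp i).getD j 0 = dp.getD j 0 := by
  unfold pvStepA
  rw [innerA_getD_ne _ _ _ _ _ _ h, pv_getD_set_ne _ _ _ _ (Ne.symm h)]

theorem Af_stable (text : String) (known : List String) (n : Nat) :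
    ∀ t j, j ≤ t → (pvAf text known n t).getD j 0 = pvG text known n j := by
  intro t
  induction t with
  | zero => intro j hj; have : j = 0 := by omega
            subst this; rfl
  | succ t ih =>
    intro j hj
    rcases Nat.lt_or_ge j (t+1) with h | h
    · rw [Af_succ, stepA_getD_ne _ _ _ _ _ (by omega), ih j (by omega)]
    · have : j = t + 1 := by omega
      subst this; rfl

theorem G_zero (text : String) (known : List String) (n : Nat) : pvG text known n 0 = 0 := by
  simp [pvG, pvAf, List.getD_eq_getElem?_getD]

theorem G_succ_fold (text : String) (known : List String) (n t : Nat) (h : t < n) :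
    pvG text known n (t+1) =
      (List.range (min (t+1) 20 - 1)).foldl (fun acc k =>
        if pvWrd text known (t + 1 - (k + 2)) (k + 2) then
          max acc (pvG text known n (t + 1 - (k + 2)) + ((k + 2 : Nat) : Int))
        else acc) (pvG text known n t) := by
  have hlen := Af_length text known n t
  have hset : t + 1 < ((pvAf text known n t).set (t+1) ((pvAf text known n t).getD (t+1-1) 0)).length := by
    simp [hlen]; omega
  show (pvAf text known n (t+1)).getD (t+1) 0 = _
  rw [Af_succ]
  unfold pvStepA
  rw [innerA_getD_self _ _ _ _ _ hset (by intro k hk; omega)]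
  have hinit : ((pvAf text known n t).set (t+1) ((pvAf text known n t).getD (t+1-1) 0)).getD (t+1) 0
      = pvG text known n t := by
    rw [pv_getD_set_self _ _ _ (by simp [hlen]; omega)]
    have : t + 1 - 1 = t := by omega
    rw [this, Af_stable _ _ _ t t le_rfl]
  rw [hinit]
  apply PySem.List.foldl_congr_mem
  intro acc k hk
  simp only [List.mem_range] at hk
  have h2 : t + 1 - (k + 2) ≠ t + 1 := by omega
  rw [pv_getD_set_ne _ _ _ _ (Ne.symm h2), Af_stable _ _ _ t _ (by omega)]

-- ---------- B side ----------

-- the generic 'group by key, append' dict loop: final membership in a bucket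
theorem pv_dict_append_mem (cond : Int → Bool) (key : Int → Int) :
    ∀ (L : List Int) (d : PySem.Dict Int (List Int)) (k x : Int),
    (x ∈ (L.foldl (fun d s => if cond s then
        PySem.Dict.insert d (key s) (PySem.Dict.getD d (key s) [] ++ [s]) else d) d).getD k [])
      ↔ x ∈ d.getD k [] ∨ ∃ s ∈ L, cond s = true ∧ key s = k ∧ x = s := by
  intro L
  induction L with
  | nil => simp
  | cons s L ih =>
    intro d k x
    simp only [List.foldl_cons, ih, List.mem_cons]
    by_cases hc : cond s = true
    · rw [if_pos hc]
      rw [PySem.Dict.getD_insert]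
      by_cases hk : k = key s
      · subst hk
        rw [if_pos rfl]
        simp only [List.mem_append, List.mem_singleton]
        constructor
        · rintro (((hx | hx) | ⟨s', hs', h₁, h₂, h₃⟩))
          · exact Or.inl hx
          · exact Or.inr ⟨s, Or.inl rfl, hc, rfl, hx⟩
          · exact Or.inr ⟨s', Or.inr hs', h₁, h₂, h₃⟩
        · rintro (hx | ⟨s', (rfl | hs'), h₁, h₂, h₃⟩)
          · exact Or.inl (Or.inl hx)
          · exact Or.inl (Or.inr h₃)
          · exact Or.inr ⟨s', hs', h₁, h₂, h₃⟩
      · rw [if_neg hk]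
        constructor
        · rintro (hx | ⟨s', hs', h₁, h₂, h₃⟩)
          · exact Or.inl hx
          · exact Or.inr ⟨s', Or.inr hs', h₁, h₂, h₃⟩
        · rintro (hx | ⟨s', (rfl | hs'), h₁, h₂, h₃⟩)
          · exact Or.inl hx
          · exact absurd h₂.symm hk
          · exact Or.inr ⟨s', hs', h₁, h₂, h₃⟩
    · rw [if_neg hc]
      constructor
      · rintro (hx | ⟨s', hs', h₁, h₂, h₃⟩)
        · exact Or.inl hx
        · exact Or.inr ⟨s', Or.inr hs', h₁, h₂, h₃⟩
      · rintro (hx | ⟨s', (rfl | hs'), h₁, h₂, h₃⟩)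
        · exact Or.inl hx
        · exact absurd h₁ hc
        · exact Or.inr ⟨s', hs', h₁, h₂, h₃⟩

-- 'word w has an occurrence [x, x + len w) recorded under key k'
def pvOcc (text : String) (n : Nat) (w : String) (k x : Int) : Prop :=
  2 ≤ PySem.Str.len w ∧ PySem.Str.len w ≤ 20 ∧ 0 ≤ x ∧
  x < (n : Int) - PySem.Str.len w + 1 ∧
  (PySem.Str.slice text (some x) (some (x + PySem.Str.len w)) == w) = true ∧
  k = x + PySem.Str.len w

theorem pvWordStep_mem (text : String) (n : Nat) (d : PySem.Dict Int (List Int)) (w : String)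
    (k x : Int) :
    x ∈ (pvWordStep text n d w).getD k [] ↔ x ∈ d.getD k [] ∨ pvOcc text n w k x := by
  unfold pvWordStep pvOcc
  by_cases hb : (PySem.Str.len w < 2 ∨ PySem.Str.len w > 20)
  · rw [if_pos hb]
    constructor
    · exact Or.inl
    · rintro (hx | h)
      · exact hx
      · rcases hb with hb | hb
        · exact absurd h.1 (by omega)
        · exact absurd h.2.1 (by omega)
  · rw [if_neg hb]
    rw [pv_dict_append_mem (fun s => PySem.Str.slice text (some s) (some (s + PySem.Str.len w)) == w) (fun s => s + PySem.Str.len w)]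
    push Not at hb
    constructor
    · rintro (hx | ⟨s, hs, h₁, h₂, h₃⟩)
      · exact Or.inl hx
      · subst h₃
        rw [PySem.List.mem_pyRange_one] at hs
        exact Or.inr ⟨by omega, by omega, hs.1, hs.2, h₁, h₂.symm⟩
    · rintro (hx | ⟨h₁, h₂, h₃, h₄, h₅, h₆⟩)
      · exact Or.inl hx
      · exact Or.inr ⟨x, PySem.List.mem_pyRange_one.mpr ⟨h₃, h₄⟩, h₅, h₆.symm, rfl⟩

theorem pvEnds_mem_aux (text : String) (n : Nat) :
    ∀ (ws : List String) (d : PySem.Dict Int (List Int)) (k x : Int),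
    x ∈ (ws.foldl (pvWordStep text n) d).getD k [] ↔
      x ∈ d.getD k [] ∨ ∃ w ∈ ws, pvOcc text n w k x := by
  intro ws
  induction ws with
  | nil => simp
  | cons w ws ih =>
    intro d k x
    simp only [List.foldl_cons, ih, pvWordStep_mem, List.mem_cons]
    constructor
    · rintro ((hx | ho) | ⟨w', hw', ho⟩)
      · exact Or.inl hx
      · exact Or.inr ⟨w, Or.inl rfl, ho⟩
      · exact Or.inr ⟨w', Or.inr hw', ho⟩
    · rintro (hx | ⟨w', (rfl | hw'), ho⟩)
      · exact Or.inl (Or.inl hx)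
      · exact Or.inl (Or.inr ho)
      · exact Or.inr ⟨w', hw', ho⟩

theorem pvEnds_mem (text : String) (known : List String) (n : Nat) (k x : Int) :
    x ∈ (pvEnds text known n).getD k [] ↔ ∃ w ∈ known, pvOcc text n w k x := by
  unfold pvEnds
  rw [pvEnds_mem_aux]
  simp [PySem.Dict.getD_empty]

-- ---------- fold-max bounds ----------

theorem pv_maxif (a b : Int) : (if b > a then b else a) = max a b := by
  split_ifs <;> omega

theorem pv_cf_init_le {α : Type} (c : α → Bool) (g : α → Int) :
    ∀ (l : List α) (a : Int), a ≤ l.foldl (fun acc x => if c x then max acc (g x) else acc) a := by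
  intro l
  induction l with
  | nil => intro a; exact le_refl a
  | cons x l ih =>
    intro a
    dsimp only [List.foldl_cons]
    refine le_trans ?_ (ih _)
    split_ifs <;> simp

theorem pv_cf_mem_le {α : Type} (c : α → Bool) (g : α → Int) :
    ∀ (l : List α) (a : Int) (x : α), x ∈ l → c x = true →
      g x ≤ l.foldl (fun acc x => if c x then max acc (g x) else acc) a := by
  intro l
  induction l with
  | nil => intro a x hx; exact absurd hx (List.not_mem_nil)
  | cons y l ih =>
    intro a x hx hc
    dsimp only [List.foldl_cons]
    rcases List.mem_cons.mp hx with rfl | hx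
    · refine le_trans ?_ (pv_cf_init_le c g l _)
      rw [if_pos hc]
      exact le_max_right _ _
    · exact ih _ x hx hc

theorem pv_cf_ub {α : Type} (c : α → Bool) (g : α → Int) :
    ∀ (l : List α) (a m : Int), a ≤ m → (∀ x ∈ l, c x = true → g x ≤ m) →
      l.foldl (fun acc x => if c x then max acc (g x) else acc) a ≤ m := by
  intro l
  induction l with
  | nil => intro a m ha _; exact ha
  | cons x l ih =>
    intro a m ha h
    dsimp only [List.foldl_cons]
    refine ih _ _ ?_ (fun y hy hc => h y (List.mem_cons_of_mem _ hy) hc)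
    split_ifs with hc
    · exact max_le ha (h x (List.mem_cons_self) hc)
    · exact ha

theorem pv_foldmax_ub {α : Type} (g : α → Int) :
    ∀ (l : List α) (a m : Int), a ≤ m → (∀ x ∈ l, g x ≤ m) →
      l.foldl (fun acc x => max acc (g x)) a ≤ m := by
  intro l
  induction l with
  | nil => intro a m ha _; exact ha
  | cons x l ih =>
    intro a m ha h
    dsimp only [List.foldl_cons]
    exact ih _ _ (max_le ha (h x (List.mem_cons_self))) (fun y hy => h y (List.mem_cons_of_mem _ hy))

-- length of the slice text[s : s+l] when it lies inside the text
theorem pv_slice_len (text : String) (s l : Nat) (h : s + l ≤ text.toList.length) :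
    PySem.Str.len (PySem.Str.slice text (some (s : Int)) (some ((s + l : Nat) : Int))) = (l : Int) := by
  rw [PySem.Str.len_eq]
  simp only [PySem.Str.toList_slice, PySem.Chars.slice_eq_listSlice, PySem.List.slice_natCast]
  have h1 : (s + l) - s = l := by omega
  rw [h1]
  simp only [List.length_take, List.length_drop]
  omega

-- every A-candidate is a recorded occurrence
theorem pv_A_to_B (text : String) (known : List String) (n t : Nat)
    (hn : n = text.toList.length) (ht : t < n) (k : Nat) (hk : k < min (t+1) 20 - 1)
    (hw : pvWrd text known (t + 1 - (k + 2)) (k + 2) = true) :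
    ((t + 1 - (k + 2) : Nat) : Int) ∈ (pvEnds text known n).getD (((t + 1 : Nat)) : Int) [] := by
  rw [pvEnds_mem]
  unfold pvWrd at hw
  set s : Nat := t + 1 - (k + 2) with hs
  set w : String := PySem.Str.slice text (some (s : Int)) (some ((s + (k + 2) : Nat) : Int)) with hwdef
  have hmem : w ∈ known := by
    have := List.contains_iff_mem.mp hw
    exact this
  have hsum : s + (k + 2) = t + 1 := by omega
  have hlen : PySem.Str.len w = ((k + 2 : Nat) : Int) := by
    rw [hwdef]
    exact pv_slice_len text s (k + 2) (by omega)
  refine ⟨w, hmem, ?_, ?_, ?_, ?_, ?_, ?_⟩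
  · rw [hlen]; push_cast; omega
  · rw [hlen]; push_cast; omega
  · positivity
  · rw [hlen]; push_cast; omega
  · have harg : (s : Int) + PySem.Str.len w = ((s + (k + 2) : Nat) : Int) := by
      rw [hlen]; push_cast; ring
    rw [harg, ← hwdef]
    exact beq_self_eq_true w
  · rw [hlen]; push_cast; omega

-- the candidate fold of B at position t+1 computes A's dp value there
theorem pvB_best (text : String) (known : List String) (n t : Nat)
    (hn : n = text.toList.length) (ht : t < n) :
    ((pvEnds text known n).getD (((t + 1 : Nat)) : Int) []).foldl
      (fun best s => max best (pvG text known n s.toNat + ((((t + 1 : Nat)) : Int) - s)))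
      (pvG text known n t) = pvG text known n (t + 1) := by
  apply le_antisymm
  · rw [G_succ_fold _ _ _ _ ht]
    apply pv_foldmax_ub
    · exact pv_cf_init_le _ _ _ _
    · intro x hx
      rw [pvEnds_mem] at hx
      obtain ⟨w, hwmem, h2, h20, hx0, hxn, hbeq, hkey⟩ := hx
      have hlw0 : 0 ≤ PySem.Str.len w := by omega
      set L : Nat := (PySem.Str.len w).toNat with hL
      have hLw : PySem.Str.len w = (L : Int) := by omega
      set s : Nat := x.toNat with hsdef
      have hxs : x = (s : Int) := by omega
      have hsum : s + L = t + 1 := by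
        have : ((t + 1 : Nat) : Int) = x + (L : Int) := by rw [← hLw]; exact hkey
        omega
      set k : Nat := L - 2 with hkdef
      have hk2 : k + 2 = L := by omega
      have hkr : k < min (t + 1) 20 - 1 := by omega
      have hslice : PySem.Str.slice text (some (s : Int)) (some ((s + (k + 2) : Nat) : Int)) = w := by
        have heq : PySem.Str.slice text (some x) (some (x + PySem.Str.len w)) = w := beq_iff_eq.mp hbeq
        have harg : x + PySem.Str.len w = ((s + (k + 2) : Nat) : Int) := by
          rw [hLw, hxs, hk2]; push_cast; ring
        rw [harg, hxs] at heq
        exact heq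
      have hcond : pvWrd text known (t + 1 - (k + 2)) (k + 2) = true := by
        unfold pvWrd
        have h1 : t + 1 - (k + 2) = s := by omega
        rw [h1, hslice]
        exact List.contains_iff_mem.mpr hwmem
      have hle := pv_cf_mem_le
        (fun k => pvWrd text known (t + 1 - (k + 2)) (k + 2))
        (fun k => pvG text known n (t + 1 - (k + 2)) + ((k + 2 : Nat) : Int))
        (List.range (min (t + 1) 20 - 1)) (pvG text known n t) k (List.mem_range.mpr hkr) hcond
      have hval : pvG text known n x.toNat + ((((t + 1 : Nat)) : Int) - x) =
          pvG text known n (t + 1 - (k + 2)) + ((k + 2 : Nat) : Int) := by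
        have h1 : t + 1 - (k + 2) = s := by omega
        rw [← hsdef, h1, hxs]
        push_cast
        omega
      rw [hval]
      exact hle
  · rw [G_succ_fold _ _ _ _ ht]
    apply pv_cf_ub
    · exact (PySem.List.le_foldl_max_int _ _ _).1
    · intro k hk hcond
      have hkr := List.mem_range.mp hk
      have hmem := pv_A_to_B text known n t hn ht k hkr hcond
      have hle := (PySem.List.le_foldl_max_int
        ((pvEnds text known n).getD (((t + 1 : Nat)) : Int) [])
        (fun s => pvG text known n s.toNat + ((((t + 1 : Nat)) : Int) - s))
        (pvG text known n t)).2 _ hmem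
      have hval : pvG text known n (t + 1 - (k + 2)) + ((k + 2 : Nat) : Int) =
          pvG text known n (((t + 1 - (k + 2) : Nat) : Int)).toNat +
            ((((t + 1 : Nat)) : Int) - ((t + 1 - (k + 2) : Nat) : Int)) := by
        rw [Int.toNat_natCast]
        have : k + 2 ≤ t + 1 := by omega
        push_cast
        omega
      rw [hval]
      exact hle

-- ---------- B's run, Nat-indexed ----------

def pvStepB (text : String) (known : List String) (n : Nat) (dp : List Int) (i : Nat) : List Int :=
  dp.set i (((pvEnds text known n).getD ((i : Nat) : Int) []).foldl
    (fun best s => if dp.getD s.toNat 0 + (((i : Nat) : Int) - s) > best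
                   then dp.getD s.toNat 0 + (((i : Nat) : Int) - s) else best)
    (dp.getD (i - 1) 0))

def pvBf (text : String) (known : List String) (n t : Nat) : List Int :=
  (List.range t).foldl (fun dp k => pvStepB text known n dp (k + 1)) (List.replicate (n + 1) 0)

theorem dpB_eq (text : String) (known : List String) :
    dp_coverage_alt text known =
      (pvBf text known text.toList.length text.toList.length).getD text.toList.length 0 := by
  unfold dp_coverage_alt pvBf
  simp only [PySem.Str.len_eq, Int.toNat_natCast]
  congr 1
  rw [pvRange1, List.foldl_map]
  apply PySem.List.foldl_congr_mem
  intro dp k hk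
  simp only [List.mem_range] at hk
  have hc : ((k : Nat) : Int) + 1 = (((k + 1 : Nat)) : Int) := by push_cast; ring
  simp only [hc, Int.toNat_natCast]
  rfl

theorem Bf_succ (text : String) (known : List String) (n t : Nat) :
    pvBf text known n (t + 1) = pvStepB text known n (pvBf text known n t) (t + 1) := by
  simp [pvBf, List.range_succ]

theorem Bf_length (text : String) (known : List String) (n t : Nat) :
    (pvBf text known n t).length = n + 1 := by
  induction t with
  | zero => simp [pvBf]
  | succ t ih => rw [Bf_succ]; unfold pvStepB; simp [ih]

theorem Bf_inv (text : String) (known : List String) (n : Nat) (hn : n = text.toList.length) :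
    ∀ t, t ≤ n → ∀ j, j ≤ n →
      (pvBf text known n t).getD j 0 = if j ≤ t then pvG text known n j else 0 := by
  intro t
  induction t with
  | zero =>
    intro _ j hj
    have h0 : (pvBf text known n 0).getD j 0 = 0 := by
      simp [pvBf, List.getD_eq_getElem?_getD, Nat.lt_succ_of_le hj]
    rw [h0]
    split_ifs with h
    · have : j = 0 := by omega
      subst this
      rw [G_zero]
    · rfl
  | succ t ih =>
    intro ht j hj
    have ih := ih (by omega)
    have hlen := Bf_length text known n t
    rw [Bf_succ]
    unfold pvStepB
    by_cases hjt : j = t + 1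
    · subst hjt
      rw [pv_getD_set_self _ _ _ (by rw [hlen]; omega), if_pos le_rfl]
      have hinit : (pvBf text known n t).getD (t + 1 - 1) 0 = pvG text known n t := by
        have h1 : t + 1 - 1 = t := by omega
        rw [h1, ih t (by omega), if_pos le_rfl]
      rw [hinit]
      rw [← pvB_best text known n t hn (by omega)]
      apply PySem.List.foldl_congr_mem
      intro acc s hs
      rw [pvEnds_mem] at hs
      obtain ⟨w, hwmem, h2, h20, hx0, hxn, hbeq, hkey⟩ := hs
      have hlw0 : 0 ≤ PySem.Str.len w := by omega
      have hst : s.toNat ≤ t := by omega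
      have hdp : (pvBf text known n t).getD s.toNat 0 = pvG text known n s.toNat := by
        rw [ih s.toNat (by omega), if_pos hst]
      rw [hdp, pv_maxif]
    · rw [pv_getD_set_ne _ _ _ _ (fun h => hjt h.symm), ih j hj]
      by_cases hjle : j ≤ t
      · rw [if_pos hjle, if_pos (by omega)]
      · rw [if_neg hjle, if_neg (by omega)]

-- ===== VERDICT (by name: the statement is the Claim_ definition above) =====
theorem dp_coverage_spec : Claim_equal_dp_coverage := by
  intro text known _
  show dp_coverage text known = dp_coverage_alt text known
  rw [dpA_eq, dpB_eq]
  rw [Bf_inv text known _ rfl _ le_rfl _ le_rfl, if_pos le_rfl]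
  rfl
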